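-- pv_equiv track=rewrite | github.com/iamhuy/rumour-veracity-verification | src/features/__init__.py | prepare_tag
-- ===== SOURCE A (Python) =====
-- import itertools
--
-- def prepare_tag(n):
--     """
--     Prepare the combination of the tagset
--     :param n: the number of gram
--     :return: the tag set relating to n
--     """
--     tag_set = ['ADJ', 'ADP', 'ADV', 'CONJ', 'DET', 'NOUN', 'NUM', 'PRT', 'PRON', 'VERB', '.', 'X']
--     ngram_tag=[]
--     if n == 1:
--         for i in tag_set:
--             ngram_tag.append("('"+i+"')")
--     elif n == 2:
--         for i in itertools.product(tag_set, tag_set):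
--             ngram_tag.append(str(i))
--     elif n == 3:
--         for i in itertools.product(tag_set, tag_set, tag_set):
--             ngram_tag.append(str(i))
--     elif n == 4:
--         for i in itertools.product(tag_set, tag_set, tag_set, tag_set):
--             ngram_tag.append(str(i))
--     return ngram_tag
-- ===== SOURCE B (Python) =====
-- def prepare_tag(n):
--     """
--     Prepare the combination of the tagset
--     :param n: the number of gram
--     :return: the tag set relating to n
--     """
--     tag_set = ['ADJ', 'ADP', 'ADV', 'CONJ', 'DET', 'NOUN', 'NUM', 'PRT', 'PRON', 'VERB', '.', 'X']
--     if n not in (1, 2, 3, 4):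
--         return []
--     # rank/unrank: the k-th n-gram is the base-12 expansion of k, most significant digit first
--     ngram_tag = []
--     for idx in range(12 ** n):
--         parts = []
--         x = idx
--         for _ in range(n):
--             parts.append(tag_set[x % 12])
--             x //= 12
--         parts.reverse()
--         ngram_tag.append("(" + ", ".join("'" + p + "'" for p in parts) + ")")
--     return ngram_tag
-- ===== Notes on version B (the rewrite author's own statement) =====
-- stated objective: alternative
-- what changed: Replaces the four itertools.product enumeration branches with combinatorial unranking: a single loop over range(12**n) that decodes each index's base-12 digits (least-significant first, then reversed) into tags and formats them with one uniform join, which yields A's comma-less n==1 form automatically.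
import Mathlib
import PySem

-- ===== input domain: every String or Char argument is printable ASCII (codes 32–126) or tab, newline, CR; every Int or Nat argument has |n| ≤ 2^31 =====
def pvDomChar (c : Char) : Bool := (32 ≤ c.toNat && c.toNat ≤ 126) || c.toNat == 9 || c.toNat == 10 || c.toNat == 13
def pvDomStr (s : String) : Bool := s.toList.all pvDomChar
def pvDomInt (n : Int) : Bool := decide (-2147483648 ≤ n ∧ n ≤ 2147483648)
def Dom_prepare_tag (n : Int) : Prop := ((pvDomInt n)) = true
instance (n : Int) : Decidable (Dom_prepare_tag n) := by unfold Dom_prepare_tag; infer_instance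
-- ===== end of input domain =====

-- B enumerates the n-grams by base-12 unranking of a single index range instead of
-- four itertools.product branches (objective: alternative algorithm, same cost).

-- ===== PORT A =====
def tagSetA : List String := ["ADJ", "ADP", "ADV", "CONJ", "DET", "NOUN", "NUM", "PRT", "PRON", "VERB", ".", "X"]
-- str(i) on a tuple of these quote-free ASCII tags; exact for tagSetA's elements
def fmtA2 (i j : String) : String := "('" ++ i ++ "', '" ++ j ++ "')"
def fmtA3 (i j k : String) : String := "('" ++ i ++ "', '" ++ j ++ "', '" ++ k ++ "')"
def fmtA4 (i j k l : String) : String := "('" ++ i ++ "', '" ++ j ++ "', '" ++ k ++ "', '" ++ l ++ "')"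
-- each append loop over itertools.product becomes the corresponding nested flatMap/map
def prepare_tag (n : Int) : List String :=
  if n = 1 then tagSetA.map (fun i => "('" ++ i ++ "')")
  else if n = 2 then tagSetA.flatMap (fun i => tagSetA.map (fun j => fmtA2 i j))
  else if n = 3 then tagSetA.flatMap (fun i => tagSetA.flatMap (fun j => tagSetA.map (fun k => fmtA3 i j k)))
  else if n = 4 then tagSetA.flatMap (fun i => tagSetA.flatMap (fun j => tagSetA.flatMap (fun k => tagSetA.map (fun l => fmtA4 i j k l))))
  else []

-- ===== PORT B =====
def tagSetB : List String := ["ADJ", "ADP", "ADV", "CONJ", "DET", "NOUN", "NUM", "PRT", "PRON", "VERB", ".", "X"]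
-- the inner digit-extraction loop: parts.append(tag_set[x % 12]); x //= 12, run n times
def decodeDigits (x : Int) : Nat → List String
  | 0 => []
  | k + 1 => PySem.List.pyGetD tagSetB (PySem.Int.mod x 12) "" :: decodeDigits (PySem.Int.floordiv x 12) k
-- "(" + ", ".join("'" + p + "'" for p in parts) + ")"
def fmtB (r : List String) : String :=
  "(" ++ PySem.Str.join ", " (r.map (fun t => "'" ++ t ++ "'")) ++ ")"
-- guard, then the single loop 'for idx in range(12 ** n)' with parts.reverse() before formatting
def prepare_tag_alt (n : Int) : List String :=
  if n = 1 ∨ n = 2 ∨ n = 3 ∨ n = 4 then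
    (PySem.List.pyRange 0 ((12 ^ n.toNat : Nat) : Int) 1).map
      (fun idx => fmtB ((decodeDigits idx n.toNat).reverse))
  else []

-- ===== PRECONDITION & SPEC =====
def Spec_prepare_tag (n : Int) (out : List String) : Prop := out = prepare_tag_alt n
instance (n : Int) (out : List String) : Decidable (Spec_prepare_tag n out) := by unfold Spec_prepare_tag; infer_instance

-- ===== CLAIM (what is proved, stated in full; the proofs are below) =====
def Claim_equal_prepare_tag : Prop := ∀ (n : Int), Dom_prepare_tag n → Spec_prepare_tag n (prepare_tag n)

-- ===== LEMMAS AND PROOFS =====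
-- proof-only helper: the n-fold product of tag lists, first coordinate slowest
def buildP : Nat → List (List String)
  | 0 => [[]]
  | k + 1 => (buildP k).flatMap (fun r => tagSetB.map (fun t => r ++ [t]))

lemma tagSetB_eq : tagSetB = tagSetA := rfl

lemma range_mul_twelve (M : Nat) :
    List.range (M * 12) = (List.range M).flatMap (fun q => (List.range 12).map (fun r => q * 12 + r)) := by
  induction M with
  | zero => simp
  | succ M ih =>
      rw [Nat.succ_mul, List.range_add, ih,
          show List.range (M + 1) = List.range M ++ [M] from List.range_succ,
          List.flatMap_append]
      simp

lemma decode_cast (m k : Nat) :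
    decodeDigits ((m : Nat) : Int) (k + 1)
      = PySem.List.pyGetD tagSetB ((m % 12 : Nat) : Int) "" :: decodeDigits ((m / 12 : Nat) : Int) k := by
  simp [decodeDigits]

lemma tags_getD : (List.range 12).map (fun r : Nat => PySem.List.pyGetD tagSetB ((r : Nat) : Int) "") = tagSetB := by
  decide

-- unranking: decoding all indices of range(12^k) yields the k-fold product in order
lemma decode_range (k : Nat) :
    (List.range (12 ^ k)).map (fun m : Nat => (decodeDigits (m : Int) k).reverse) = buildP k := by
  induction k with
  | zero => simp [decodeDigits, buildP]
  | succ k ih =>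
      have hpow : 12 ^ (k + 1) = 12 ^ k * 12 := by ring
      rw [hpow, range_mul_twelve, List.map_flatMap]
      conv_rhs => rw [buildP, ← ih, List.flatMap_map]
      apply List.flatMap_congr
      intro q _
      rw [List.map_map]
      have hinner : ∀ r ∈ List.range 12,
          ((fun m : Nat => (decodeDigits (m : Int) (k + 1)).reverse) ∘ (fun r => q * 12 + r)) r
            = (decodeDigits ((q : Nat) : Int) k).reverse ++ [PySem.List.pyGetD tagSetB ((r : Nat) : Int) ""] := by
        intro r hr
        have hr12 : r < 12 := List.mem_range.mp hr
        have hm : (q * 12 + r) % 12 = r := by omega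
        have hd : (q * 12 + r) / 12 = q := by omega
        show (decodeDigits ((q * 12 + r : Nat) : Int) (k + 1)).reverse = _
        rw [decode_cast, hm, hd, List.reverse_cons]
      rw [List.map_congr_left hinner]
      have := congrArg (List.map (fun t => (decodeDigits ((q : Nat) : Int) k).reverse ++ [t])) tags_getD
      rw [List.map_map] at this
      exact this

lemma alt_eq (n : Int) (h : n = 1 ∨ n = 2 ∨ n = 3 ∨ n = 4) :
    prepare_tag_alt n = (buildP n.toNat).map fmtB := by
  rw [prepare_tag_alt, if_pos h, PySem.List.pyRange_one]
  have : ((((12 ^ n.toNat : Nat) : Int)) - 0).toNat = 12 ^ n.toNat := by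
    rw [Int.sub_zero, Int.toNat_natCast]
  rw [this, List.map_map, ← decode_range n.toNat, List.map_map]
  simp [Function.comp_def]

-- B's uniform join formatter agrees with A's fixed-arity formats (incl. the comma-less n=1 form)
lemma fmtB_one (i : String) : fmtB [i] = "('" ++ i ++ "')" := by
  apply String.toList_injective
  simp [fmtB, PySem.Str.join, PySem.Chars.join, List.intercalate]

lemma fmtB_two (i j : String) : fmtB [i, j] = fmtA2 i j := by
  apply String.toList_injective
  simp [fmtB, fmtA2, PySem.Str.join, PySem.Chars.join, List.intercalate]

lemma fmtB_three (i j k : String) : fmtB [i, j, k] = fmtA3 i j k := by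
  apply String.toList_injective
  simp [fmtB, fmtA3, PySem.Str.join, PySem.Chars.join, List.intercalate]

lemma fmtB_four (i j k l : String) : fmtB [i, j, k, l] = fmtA4 i j k l := by
  apply String.toList_injective
  simp [fmtB, fmtA4, PySem.Str.join, PySem.Chars.join, List.intercalate]

lemma case_one : prepare_tag 1 = prepare_tag_alt 1 := by
  rw [alt_eq 1 (by norm_num)]
  simp [prepare_tag, buildP, tagSetB_eq, List.map_map, Function.comp_def, fmtB_one]

lemma case_two : prepare_tag 2 = prepare_tag_alt 2 := by
  rw [alt_eq 2 (by norm_num)]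
  simp [prepare_tag, buildP, tagSetB_eq, List.map_flatMap, List.flatMap_map,
        Function.comp_def, fmtB_two]

lemma case_three : prepare_tag 3 = prepare_tag_alt 3 := by
  rw [alt_eq 3 (by norm_num)]
  simp [prepare_tag, buildP, tagSetB_eq, List.map_flatMap, List.flatMap_map,
        List.flatMap_assoc, Function.comp_def, fmtB_three]

lemma case_four : prepare_tag 4 = prepare_tag_alt 4 := by
  rw [alt_eq 4 (by norm_num)]
  simp [prepare_tag, buildP, tagSetB_eq, List.map_flatMap, List.flatMap_map,
        List.flatMap_assoc, Function.comp_def, fmtB_four]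

-- ===== VERDICT (by name: the statement is the Claim_ definition above) =====
theorem prepare_tag_spec : Claim_equal_prepare_tag := by
  intro n _
  unfold Spec_prepare_tag
  by_cases h1 : n = 1
  · subst h1; exact case_one
  by_cases h2 : n = 2
  · subst h2; exact case_two
  by_cases h3 : n = 3
  · subst h3; exact case_three
  by_cases h4 : n = 4
  · subst h4; exact case_four
  simp [prepare_tag, prepare_tag_alt, h1, h2, h3, h4]
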